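-- pv_equiv track=rewrite | github.com/a-l-r1/cryptography | finite_field.py | gf_2_4_mul_nocheck
-- ===== SOURCE A (Python) =====
-- GF_2_4_PRIM_POLY = 0x13
--
-- def gf_2_4_add_nocheck(a: int, b: int) -> int:
--     return a ^ b
--
-- def gf_2_4_mul_x_nocheck(a: int, prim_poly: int = GF_2_4_PRIM_POLY) -> int:
--     # 看对应的多项式 3 次项是否为 1，需要用位掩码 0x8 判断
--     if a & 0x8 == 0x8:
--         # 如果对应的多项式 3 次项为 1，那么先异或 0x8 减去最高次项，再左移一位，
--         # 然后异或 0x3 (x + 1)，这相当于先左移一位再模掉 x^4 + x + 1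
--         # 其他多项式同理
--         return ((a ^ 0x8) << 1) ^ (prim_poly & 0xf)
--     else:
--         # 否则只需要左移一位即可
--         return a << 1
--
-- def gf_2_4_mul_nocheck(a: int, b: int, \
--                        prim_poly: int = GF_2_4_PRIM_POLY) -> int:
--     # GF(2^4) 中的零元是 0x0，这与取哪个多项式做本原多项式无关
--     result = 0x0
--     a_mul = a
--
--     for i in range(4):
--         bitmask = 1 << i
--
--         if b & bitmask == bitmask:
--             result = gf_2_4_add_nocheck(result, a_mul)
--
--         a_mul = gf_2_4_mul_x_nocheck(a_mul, prim_poly=prim_poly)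
--
--     return result
-- ===== SOURCE B (Python) =====
-- GF_2_4_PRIM_POLY = 0x13
--
-- def gf_2_4_add_nocheck(a: int, b: int) -> int:
--     return a ^ b
--
-- def gf_2_4_mul_x_nocheck(a: int, prim_poly: int = GF_2_4_PRIM_POLY) -> int:
--     if a & 0x8 == 0x8:
--         return ((a ^ 0x8) << 1) ^ (prim_poly & 0xf)
--     else:
--         return a << 1
--
-- def gf_2_4_mul_nocheck(a: int, b: int, \
--                        prim_poly: int = GF_2_4_PRIM_POLY) -> int:
--     # Horner scheme: scan b's bits from high to low; multiply the accumulator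
--     # by x each step and add (XOR) the unshifted a when the current bit is set.
--     result = 0x0
--     for i in range(3, -1, -1):
--         result = gf_2_4_mul_x_nocheck(result, prim_poly=prim_poly)
--         if b & (1 << i):
--             result = gf_2_4_add_nocheck(result, a)
--     return result
-- ===== Notes on version B (the rewrite author's own statement) =====
-- stated objective: alternative
-- what changed: A scans b's bits low-to-high while maintaining a shifted copy of a (a_mul = x^i * a); B uses a Horner scheme that scans b's bits high-to-low, multiplying the accumulator by x each step and XOR-ing in the unshifted a, so no shifted copy of a is kept.
import Mathlib
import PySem

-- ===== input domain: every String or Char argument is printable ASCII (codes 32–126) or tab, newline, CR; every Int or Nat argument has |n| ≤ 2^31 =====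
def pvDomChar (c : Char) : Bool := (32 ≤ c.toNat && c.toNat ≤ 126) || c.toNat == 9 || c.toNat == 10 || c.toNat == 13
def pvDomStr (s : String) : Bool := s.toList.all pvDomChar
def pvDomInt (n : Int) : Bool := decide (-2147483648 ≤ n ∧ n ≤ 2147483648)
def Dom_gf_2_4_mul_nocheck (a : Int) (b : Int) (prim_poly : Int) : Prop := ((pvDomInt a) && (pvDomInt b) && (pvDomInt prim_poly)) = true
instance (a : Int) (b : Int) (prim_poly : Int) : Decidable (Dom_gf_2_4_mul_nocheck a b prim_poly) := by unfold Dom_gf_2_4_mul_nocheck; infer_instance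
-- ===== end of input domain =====

-- B replaces A's low-to-high shift-and-add (which maintains a shifted copy of a) by a
-- high-to-low Horner scheme that multiplies the accumulator by x each step (objective: alternative).

-- ===== PORT A =====
-- shared module helpers (Python: gf_2_4_add_nocheck and gf_2_4_mul_x_nocheck, both called by A and B)
def gf_add (a : Int) (b : Int) : Int := PySem.Int.bxor a b

def gf_mul_x (a : Int) (prim_poly : Int) : Int :=
  if PySem.Int.band a 8 = 8 then
    PySem.Int.bxor ((PySem.Int.bxor a 8) <<< (1:Nat)) (PySem.Int.band prim_poly 15)
  else
    a <<< (1:Nat)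

-- transliteration of A: for i in range(4), test bit i of b, xor a_mul into result, shift a_mul.
-- (the shift count of `1 << i` is i.toNat; i ranges over 0..3 ≥ 0, so this is exact)
def gf_2_4_mul_nocheck (a : Int) (b : Int) (prim_poly : Int) : Int :=
  ((PySem.List.pyRange 0 4 1).foldl (fun (st : Int × Int) i =>
      let bitmask : Int := (1:Int) <<< i.toNat
      ((if PySem.Int.band b bitmask = bitmask then gf_add st.1 st.2 else st.1),
        gf_mul_x st.2 prim_poly)) ((0:Int), a)).1

-- ===== PORT B =====
-- transliteration of B: for i in range(3, -1, -1), multiply accumulator by x, xor in a if bit i of b is set.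
def gf_2_4_mul_nocheck_alt (a : Int) (b : Int) (prim_poly : Int) : Int :=
  (PySem.List.pyRange 3 (-1) (-1)).foldl (fun result i =>
      let result' := gf_mul_x result prim_poly
      if PySem.Int.band b ((1:Int) <<< i.toNat) ≠ 0 then gf_add result' a else result') 0

-- ===== PRECONDITION & SPEC =====
def Spec_gf_2_4_mul_nocheck (a : Int) (b : Int) (prim_poly : Int) (out : Int) : Prop := out = gf_2_4_mul_nocheck_alt a b prim_poly
instance (a : Int) (b : Int) (prim_poly : Int) (out : Int) : Decidable (Spec_gf_2_4_mul_nocheck a b prim_poly out) := by unfold Spec_gf_2_4_mul_nocheck; infer_instance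

-- ===== CLAIM (what is proved, stated in full; the proofs are below) =====
def Claim_equal_gf_2_4_mul_nocheck : Prop := ∀ (a : Int) (b : Int) (prim_poly : Int), Dom_gf_2_4_mul_nocheck a b prim_poly → Spec_gf_2_4_mul_nocheck a b prim_poly (gf_2_4_mul_nocheck a b prim_poly)

-- ===== LEMMAS AND PROOFS =====
theorem bxor_nn (m n : Nat) : PySem.Int.bxor (m:Int) (n:Int) = ((m ^^^ n : Nat) : Int) := by
  simp [PySem.Int.bxor]
theorem bxor_ns (m n : Nat) : PySem.Int.bxor (m:Int) (Int.negSucc n) = Int.negSucc (m ^^^ n) := by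
  simp [PySem.Int.bxor, Int.negSucc_eq]
  omega
theorem bxor_sn (m n : Nat) : PySem.Int.bxor (Int.negSucc m) (n:Int) = Int.negSucc (m ^^^ n) := by
  simp [PySem.Int.bxor, Int.negSucc_eq]
  omega
theorem bxor_ss (m n : Nat) : PySem.Int.bxor (Int.negSucc m) (Int.negSucc n) = ((m ^^^ n : Nat) : Int) := by
  simp [PySem.Int.bxor, Int.negSucc_eq]
  omega

theorem bxor_assoc (x y z : Int) :
    PySem.Int.bxor (PySem.Int.bxor x y) z = PySem.Int.bxor x (PySem.Int.bxor y z) := by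
  rcases x with m | m <;> rcases y with n | n <;> rcases z with k | k <;>
    simp [bxor_ns, bxor_sn, bxor_ss, Nat.xor_assoc]

theorem nxor_ee (u v : Nat) : (2*u) ^^^ (2*v) = 2*(u^^^v) := by
  have := Nat.xor_bit false u false v; simpa [Nat.bit_val] using this
theorem nxor_oe (u v : Nat) : (2*u+1) ^^^ (2*v) = 2*(u^^^v)+1 := by
  have := Nat.xor_bit true u false v; simpa [Nat.bit_val] using this
theorem nxor_oo (u v : Nat) : (2*u+1) ^^^ (2*v+1) = 2*(u^^^v) := by
  have := Nat.xor_bit true u true v; simpa [Nat.bit_val] using this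

theorem bxor_double (x y : Int) : PySem.Int.bxor (2*x) (2*y) = 2 * PySem.Int.bxor x y := by
  rcases x with m | m <;> rcases y with n | n <;> try simp only [Int.ofNat_eq_natCast]
  · rw [show ((2:Int)*m) = ((2*m : Nat) : Int) by push_cast; ring,
        show ((2:Int)*n) = ((2*n : Nat) : Int) by push_cast; ring,
        bxor_nn, bxor_nn, nxor_ee]; push_cast; ring
  · rw [show ((2:Int)*m) = ((2*m : Nat) : Int) by push_cast; ring,
        show ((2:Int)*(Int.negSucc n)) = Int.negSucc (2*n+1) by simp [Int.negSucc_eq]; ring,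
        bxor_ns, bxor_ns, Nat.xor_comm, nxor_oe, Nat.xor_comm]
    simp [Int.negSucc_eq]; ring
  · rw [show ((2:Int)*n) = ((2*n : Nat) : Int) by push_cast; ring,
        show ((2:Int)*(Int.negSucc m)) = Int.negSucc (2*m+1) by simp [Int.negSucc_eq]; ring,
        bxor_sn, bxor_sn, nxor_oe]
    simp [Int.negSucc_eq]; ring
  · rw [show ((2:Int)*(Int.negSucc m)) = Int.negSucc (2*m+1) by simp [Int.negSucc_eq]; ring,
        show ((2:Int)*(Int.negSucc n)) = Int.negSucc (2*n+1) by simp [Int.negSucc_eq]; ring,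
        bxor_ss, bxor_ss, nxor_oo]
    push_cast; ring

def xbit (k : Nat) : Int → Bool
  | .ofNat m => m.testBit k
  | .negSucc m => !(m.testBit k)

theorem pow2_toNat (k : Nat) : ((2:Int)^k).toNat = 2^k := by
  rw [show ((2:Int)^k) = ((2^k : Nat) : Int) by push_cast; ring, Int.toNat_natCast]

theorem bandpow (k : Nat) (x : Int) :
    PySem.Int.band x ((2:Int)^k) = if xbit k x then (2:Int)^k else 0 := by
  rcases x with m | m
  · simp only [xbit, PySem.Int.band, Int.ofNat_eq_natCast]
    rw [if_pos (Int.natCast_nonneg m), if_pos (by positivity), pow2_toNat,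
        Int.toNat_natCast, Nat.and_two_pow]
    rcases Bool.eq_false_or_eq_true (m.testBit k) with h | h <;> simp only [h] <;> simp
  · simp only [xbit, PySem.Int.band]
    rw [if_neg (by simp [Int.negSucc_eq]; omega), if_pos (by positivity), pow2_toNat,
        show (-Int.negSucc m - 1).toNat = m by simp [Int.negSucc_eq],
        Nat.and_comm, Nat.and_two_pow]
    rcases Bool.eq_false_or_eq_true (m.testBit k) with h | h <;> simp only [h] <;> simp

theorem xbit_bxor (k : Nat) (x y : Int) :
    xbit k (PySem.Int.bxor x y) = (xbit k x != xbit k y) := by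
  rcases x with m | m <;> rcases y with n | n <;>
    simp [bxor_ns, bxor_sn, bxor_ss, xbit, Nat.testBit_xor]

theorem shl1 (x : Int) : x <<< (1:Nat) = 2*x := by
  simp [Int.shiftLeft_eq]; ring

theorem band8 (x : Int) : PySem.Int.band x 8 = if xbit 3 x then 8 else 0 := by
  simpa using bandpow 3 x

theorem zero_bxor (x : Int) : PySem.Int.bxor 0 x = x := by
  rw [PySem.Int.bxor_comm]; exact PySem.Int.bxor_zero x

-- cancel: (u ^ p) ^ (v ^ p) = u ^ v
theorem bxor_cancel (u v p : Int) :
    PySem.Int.bxor (PySem.Int.bxor u p) (PySem.Int.bxor v p) = PySem.Int.bxor u v := by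
  rw [bxor_assoc u p (PySem.Int.bxor v p), PySem.Int.bxor_comm v p, ← bxor_assoc p p v,
      PySem.Int.bxor_self, zero_bxor]

theorem gf_mul_x_zero (p : Int) : gf_mul_x 0 p = 0 := by
  rw [gf_mul_x, if_neg (by decide), shl1]; ring

theorem gf_mul_x_eq (z p : Int) :
    gf_mul_x z p = if xbit 3 z then PySem.Int.bxor (2*z) (PySem.Int.bxor 16 (PySem.Int.band p 15)) else 2*z := by
  unfold gf_mul_x
  by_cases hz : xbit 3 z = true
  · rw [if_pos (by rw [band8, hz]; rfl), if_pos hz, shl1,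
        show (2 * PySem.Int.bxor z 8 : Int) = PySem.Int.bxor (2*z) 16 by
          rw [← bxor_double]; norm_num,
        bxor_assoc]
  · rw [if_neg (by rw [band8, if_neg hz]; decide), if_neg hz, shl1]

theorem bxor_right_comm (a b c : Int) :
    PySem.Int.bxor (PySem.Int.bxor a b) c = PySem.Int.bxor (PySem.Int.bxor a c) b := by
  rw [bxor_assoc, PySem.Int.bxor_comm b c, ← bxor_assoc]

theorem gf_mul_x_linear (x y p : Int) :
    gf_mul_x (PySem.Int.bxor x y) p = PySem.Int.bxor (gf_mul_x x p) (gf_mul_x y p) := by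
  rw [gf_mul_x_eq, gf_mul_x_eq, gf_mul_x_eq, xbit_bxor, ← bxor_double]
  rcases Bool.eq_false_or_eq_true (xbit 3 x) with hx | hx <;>
    rcases Bool.eq_false_or_eq_true (xbit 3 y) with hy | hy <;>
    simp only [hx, hy] <;> norm_num
  · rw [bxor_cancel]
  · rw [bxor_right_comm]
  · rw [bxor_assoc]

theorem band_pow_eq_iff (k : Nat) (b : Int) :
    (PySem.Int.band b ((2:Int)^k) = (2:Int)^k) ↔ xbit k b = true := by
  rw [bandpow]
  rcases Bool.eq_false_or_eq_true (xbit k b) with h | h <;> simp [h]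
  all_goals positivity

theorem band_pow_ne_iff (k : Nat) (b : Int) :
    (¬ PySem.Int.band b ((2:Int)^k) = 0) ↔ xbit k b = true := by
  rw [bandpow]
  rcases Bool.eq_false_or_eq_true (xbit k b) with h | h <;> simp [h]

theorem rev3 (u v w : Int) :
    PySem.Int.bxor (PySem.Int.bxor u v) w = PySem.Int.bxor (PySem.Int.bxor w v) u := by
  rw [PySem.Int.bxor_comm u v, bxor_right_comm, PySem.Int.bxor_comm v w]

theorem rev4 (u v w z : Int) :
    PySem.Int.bxor (PySem.Int.bxor (PySem.Int.bxor u v) w) z =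
      PySem.Int.bxor (PySem.Int.bxor (PySem.Int.bxor z w) v) u := by
  rw [rev3 u v w, bxor_right_comm (PySem.Int.bxor w v) u z, bxor_right_comm w v z,
      PySem.Int.bxor_comm w z]

theorem gf_main (a b prim_poly : Int) :
    gf_2_4_mul_nocheck a b prim_poly = gf_2_4_mul_nocheck_alt a b prim_poly := by
  have e1 : PySem.List.pyRange 0 4 1 = [0,1,2,3] := by decide
  have e2 : PySem.List.pyRange 3 (-1) (-1) = [3,2,1,0] := by decide
  unfold gf_2_4_mul_nocheck gf_2_4_mul_nocheck_alt
  rw [e1, e2]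
  simp only [List.foldl]
  have m0 : ((1:Int) <<< (((0:Int)).toNat : Int)) = 2^0 := by decide
  have m1 : ((1:Int) <<< (((1:Int)).toNat : Int)) = 2^1 := by decide
  have m2 : ((1:Int) <<< (((2:Int)).toNat : Int)) = 2^2 := by decide
  have m3 : ((1:Int) <<< (((3:Int)).toNat : Int)) = 2^3 := by decide
  simp only [m0, m1, m2, m3, band_pow_eq_iff, band_pow_ne_iff, gf_add]
  rcases Bool.eq_false_or_eq_true (xbit 3 b) with h3 | h3 <;>
    rcases Bool.eq_false_or_eq_true (xbit 2 b) with h2 | h2 <;>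
    rcases Bool.eq_false_or_eq_true (xbit 1 b) with h1 | h1 <;>
    rcases Bool.eq_false_or_eq_true (xbit 0 b) with h0 | h0 <;>
    simp [h0, h1, h2, h3, gf_mul_x_linear, gf_mul_x_zero, zero_bxor] <;>
    try (first
      | rw [rev4]
      | rw [rev3]
      | rw [PySem.Int.bxor_comm])

-- ===== VERDICT (by name: the statement is the Claim_ definition above) =====
theorem gf_2_4_mul_nocheck_spec : Claim_equal_gf_2_4_mul_nocheck := by
  intro a b prim_poly _
  unfold Spec_gf_2_4_mul_nocheck
  exact gf_main a b prim_poly
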